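-- pv_equiv track=rewrite | github.com/erenersarac10/legalnewest | backend/api/middleware/tenant_context.py | _is_public_route
-- ===== SOURCE A (Python) =====
-- def _is_public_route(path: str) -> bool:
--     """
--     Check if route is public.
--
--     Args:
--         path: Request path
--
--     Returns:
--         True if route is public
--     """
--     public_routes = [
--         "/",
--         "/docs",
--         "/redoc",
--         "/openapi.json",
--         "/health",
--         "/metrics",
--         "/api/v1/auth/login",
--         "/api/v1/auth/register",
--         "/api/v1/auth/forgot-password",
--     ]
--
--     return path in public_routes or any(
--         path.startswith(route) for route in public_routes
--     )
-- ===== SOURCE B (Python) =====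
-- def _is_public_route(path: str) -> bool:
--     # Every public route starts with "/" and "/" itself is public, so the
--     # prefix test against the whole list collapses to a single check.
--     return path.startswith("/")
-- ===== Notes on version B (the rewrite author's own statement) =====
-- stated objective: simpler
-- what changed: Since '/' is itself a public route and every entry begins with '/', the membership test and the prefix loop over the whole list collapse to the single closed-form check path.startswith('/'); the list and both scans are removed.
import Mathlib
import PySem

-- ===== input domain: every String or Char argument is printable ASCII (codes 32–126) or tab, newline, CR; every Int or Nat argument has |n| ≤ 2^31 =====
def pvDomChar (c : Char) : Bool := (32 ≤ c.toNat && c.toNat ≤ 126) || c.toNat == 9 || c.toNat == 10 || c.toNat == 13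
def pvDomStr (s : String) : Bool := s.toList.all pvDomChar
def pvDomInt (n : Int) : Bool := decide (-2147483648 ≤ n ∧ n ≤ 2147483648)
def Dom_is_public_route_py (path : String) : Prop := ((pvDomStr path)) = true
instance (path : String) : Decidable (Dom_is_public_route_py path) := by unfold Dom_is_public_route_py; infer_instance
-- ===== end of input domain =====

-- B replaces A's route list, membership test and prefix loop by the single
-- equivalent check path.startswith("/") (simpler; "/" is in the list and every
-- entry starts with "/").

-- ===== PORT A =====
def is_public_route_py (path : String) : Bool :=
  let public_routes : List String :=
    ["/", "/docs", "/redoc", "/openapi.json", "/health", "/metrics",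
     "/api/v1/auth/login", "/api/v1/auth/register", "/api/v1/auth/forgot-password"]
  public_routes.contains path ||
    public_routes.any (fun route => PySem.Str.startswith path route)

-- ===== PORT B =====
def is_public_route_py_alt (path : String) : Bool :=
  PySem.Str.startswith path "/"

-- ===== PRECONDITION & SPEC =====
def Spec_is_public_route_py (path : String) (out : Bool) : Prop := out = is_public_route_py_alt path
instance (path : String) (out : Bool) : Decidable (Spec_is_public_route_py path out) := by unfold Spec_is_public_route_py; infer_instance

-- ===== CLAIM (what is proved, stated in full; the proofs are below) =====
def Claim_equal_is_public_route_py : Prop := ∀ (path : String), Dom_is_public_route_py path → Spec_is_public_route_py path (is_public_route_py path)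

-- ===== LEMMAS AND PROOFS =====

-- the route list of port A, named for the proofs
def pvRoutes : List String :=
  ["/", "/docs", "/redoc", "/openapi.json", "/health", "/metrics",
   "/api/v1/auth/login", "/api/v1/auth/register", "/api/v1/auth/forgot-password"]

theorem is_public_route_py_eq (path : String) :
    is_public_route_py path =
      (pvRoutes.contains path || pvRoutes.any (fun route => PySem.Str.startswith path route)) := rfl

-- every route in the list starts with "/"
theorem pvRoutes_slash : ∀ r ∈ pvRoutes, PySem.Str.startswith r "/" = true := by decide

-- if r starts with "/" and path starts with r, then path starts with "/"
theorem sw_trans {path r : String} (h1 : PySem.Str.startswith r "/" = true)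
    (h2 : PySem.Str.startswith path r = true) :
    PySem.Str.startswith path "/" = true := by
  simp only [PySem.Str.startswith_eq, PySem.Chars.startswith_iff] at h1 h2 ⊢
  exact h1.trans h2

-- ===== VERDICT (by name: the statement is the Claim_ definition above) =====
theorem is_public_route_py_spec : Claim_equal_is_public_route_py := by
  intro path _
  unfold Spec_is_public_route_py is_public_route_py_alt
  rw [is_public_route_py_eq]
  by_cases h : PySem.Str.startswith path "/" = true
  · have hany : pvRoutes.any (fun route => PySem.Str.startswith path route) = true :=
      List.any_eq_true.mpr ⟨"/", by decide, h⟩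
    rw [hany, h, Bool.or_true]
  · have h0 : PySem.Str.startswith path "/" = false := Bool.eq_false_iff.mpr h
    have hany : pvRoutes.any (fun route => PySem.Str.startswith path route) = false := by
      rw [List.any_eq_false]
      intro r hr hc
      exact h (sw_trans (pvRoutes_slash r hr) hc)
    have hcon : pvRoutes.contains path = false := by
      by_contra hcc
      have hm : path ∈ pvRoutes := by
        simpa using Bool.not_eq_false _ |>.mp hcc
      have hself : PySem.Str.startswith path path = true := by
        simp [PySem.Str.startswith_eq, PySem.Chars.startswith_iff]
      exact h (sw_trans (pvRoutes_slash path hm) hself)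
    rw [hany, hcon, h0, Bool.or_false]
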